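-- pv_equiv track=rewrite | github.com/velarun/Golang_codes | Algorithms/DynamicProgramming/count_k_bits_of_binary.py | countOfSubstringWithKZeros
-- ===== SOURCE A (Python) =====
-- def countOfSubstringWithKZeros(s, k):
--     N = len(s)
--     res = 0
--     countOfOne = 0
--     freq = [0 for i in range(N + 1)]
--
--     freq[0] = 1
--
--     for i in range(0, N, 1):
--         countOfOne += ord('1') - ord(s[i])
--         if (countOfOne >= k):
--             res += freq[countOfOne - k]
--         freq[countOfOne] += 1
--
--     return res
-- ===== SOURCE B (Python) =====
-- def countOfSubstringWithKZeros(s, k):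
--     # Sliding-window decomposition: exactly-k = atMost(k) - atMost(k-1).
--     def at_most(m):
--         if m < 0:
--             return 0
--         total = 0
--         left = 0
--         zeros = 0
--         for right in range(len(s)):
--             if s[right] == '0':
--                 zeros += 1
--             while zeros > m:
--                 if s[left] == '0':
--                     zeros -= 1
--                 left += 1
--             total += right - left + 1
--         return total
--     return at_most(k) - at_most(k - 1)
-- ===== Notes on version B (the rewrite author's own statement) =====
-- stated objective: alternative
-- what changed: Replaces A's one-pass prefix-zero-count histogram (a frequency array indexed by ord-weighted prefix sums) with the sliding-window identity exactly(k) = atMost(k) - atMost(k-1), where atMost(m) counts substrings with at most m zeros by a left-pointer window; Pre_ restricts to the natural domain (binary strings) and to inputs where A does not raise IndexError.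
-- outside the precondition, e.g. on countOfSubstringWithKZeros('2', 0): A returns 0, B returns 1; on countOfSubstringWithKZeros('21', 1): A returns 0, B returns 0
import Mathlib
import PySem

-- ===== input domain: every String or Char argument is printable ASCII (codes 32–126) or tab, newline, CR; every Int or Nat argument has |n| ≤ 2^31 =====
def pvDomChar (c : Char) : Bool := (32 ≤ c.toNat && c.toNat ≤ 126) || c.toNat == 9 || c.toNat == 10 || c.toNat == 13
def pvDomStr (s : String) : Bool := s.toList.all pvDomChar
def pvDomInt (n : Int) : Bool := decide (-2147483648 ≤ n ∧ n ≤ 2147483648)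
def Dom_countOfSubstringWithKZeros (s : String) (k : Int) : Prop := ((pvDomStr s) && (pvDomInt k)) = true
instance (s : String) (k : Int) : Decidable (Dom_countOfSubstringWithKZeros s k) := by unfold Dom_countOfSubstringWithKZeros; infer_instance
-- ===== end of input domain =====

-- B replaces A's prefix-zero-count histogram by the sliding-window identity
-- exactly(k) = atMost(k) - atMost(k-1): an alternative algorithm of the same cost,
-- proved equal on binary strings on which A returns.

-- ===== PORT A =====
-- loop body of A: countOfOne += ord('1') - ord(s[i]); conditional res update; freq[countOfOne] += 1
def pvAStep (k : Int) (st : Int × Int × List Int) (c : Char) : Int × Int × List Int :=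
  let countOfOne := st.2.1 + (49 - (c.toNat : Int))
  let res := if k ≤ countOfOne then st.1 + PySem.List.pyGetD st.2.2 (countOfOne - k) 0 else st.1
  (res, countOfOne, PySem.List.pySetD st.2.2 countOfOne (PySem.List.pyGetD st.2.2 countOfOne 0 + 1))

def countOfSubstringWithKZeros (s : String) (k : Int) : Int :=
  let l := s.toList
  -- freq = [0 for i in range(N + 1)]; freq[0] = 1
  let freq0 : List Int := (PySem.List.pyRange 0 (PySem.Str.len s + 1) 1).map (fun _ => (0 : Int))
  let freq1 := PySem.List.pySetD freq0 0 1
  -- for i in range(0, N, 1): …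
  ((PySem.List.pyRange 0 (PySem.Str.len s) 1).foldl
     (fun st i => pvAStep k st (PySem.List.pyGetD l i ' ')) ((0 : Int), (0 : Int), freq1)).1

-- ===== PORT B =====
-- the 'while zeros > m' loop; the left pointer is modelled by the window suffix s[left:right+1],
-- so 's[left]' is the window head and 'left += 1' drops it (exact under the loop invariant)
def pvShrink (m : Int) : List Char → Int → List Char × Int
  | [], z => ([], z)
  | d :: w, z => if m < z then pvShrink m w (z - (if d = '0' then 1 else 0)) else (d :: w, z)

-- one step of the 'for right in range(len(s))' loop: state = (window, zeros, total)
def pvBStep (m : Int) (st : List Char × Int × Int) (c : Char) : List Char × Int × Int :=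
  let z := st.2.1 + (if c = '0' then 1 else 0)
  let p := pvShrink m (st.1 ++ [c]) z
  (p.1, p.2, st.2.2 + (p.1.length : Int))

def pvAtMost (l : List Char) (m : Int) : Int :=
  if m < 0 then 0 else (l.foldl (pvBStep m) (([], 0, 0) : List Char × Int × Int)).2.2

def countOfSubstringWithKZeros_alt (s : String) (k : Int) : Int :=
  pvAtMost s.toList k - pvAtMost s.toList (k - 1)

-- ===== PRECONDITION & SPEC =====
-- Pre_ restricts to the natural domain of this binary-string algorithm: strings of '0'/'1' only
-- (on non-binary input A's ord-weighted indexing is accidental: it wraps or raises IndexError),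
-- and excludes nonempty inputs with count0(s) - k > len(s), on which A raises IndexError.
def Pre_countOfSubstringWithKZeros (s : String) (k : Int) : Prop :=
  (s.toList.all (fun c => c == '0' || c == '1') = true) ∧
  (s.toList = [] ∨ (s.toList.count '0' : Int) - k ≤ (s.toList.length : Int))
instance (s : String) (k : Int) : Decidable (Pre_countOfSubstringWithKZeros s k) := by
  unfold Pre_countOfSubstringWithKZeros; infer_instance
def pvWitness_countOfSubstringWithKZeros : String × Int := ("0101", 1)

def Spec_countOfSubstringWithKZeros (s : String) (k : Int) (out : Int) : Prop := out = countOfSubstringWithKZeros_alt s k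
instance (s : String) (k : Int) (out : Int) : Decidable (Spec_countOfSubstringWithKZeros s k out) := by unfold Spec_countOfSubstringWithKZeros; infer_instance

-- ===== CLAIM (what is proved, stated in full; the proofs are below) =====
def Claim_equal_countOfSubstringWithKZeros : Prop := ∀ (s : String) (k : Int), Dom_countOfSubstringWithKZeros s k → Pre_countOfSubstringWithKZeros s k → Spec_countOfSubstringWithKZeros s k (countOfSubstringWithKZeros s k)

-- ===== LEMMAS AND PROOFS =====

-- number of '0's in a list, as an Int
def pvCz (p : List Char) : Int := (p.count '0' : Int)
-- number of '0's among the first t characters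
def pvZ (l : List Char) (t : Nat) : Int := pvCz (l.take t)
-- #{t < j : the substring s[t:j] has ≤ m zeros}
def pvG (l : List Char) (m : Int) (j : Nat) : Int :=
  (((Finset.range j).filter (fun t => pvZ l j - pvZ l t ≤ m)).card : Int)
-- #{t < j : the substring s[t:j] has exactly k zeros}
def pvE (l : List Char) (k : Int) (j : Nat) : Int :=
  (((Finset.range j).filter (fun t => pvZ l j - pvZ l t = k)).card : Int)
-- A's running result after n steps
def pvAsum (l : List Char) (k : Int) (n : Nat) : Int := ∑ j ∈ Finset.range n, pvE l k (j + 1)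
-- the longest suffix with at most m zeros (the window B maintains)
def pvSw (m : Int) : List Char → List Char
  | [] => []
  | d :: w => if pvCz (d :: w) ≤ m then d :: w else pvSw m w
-- A's freq array after n steps: freq[c] = #{t ≤ n : prefix of length t has c zeros}
def pvTab (l : List Char) (n : Nat) : List Int :=
  (List.range (l.length + 1)).map
    (fun (c : Nat) => (((Finset.range (n + 1)).filter (fun t => pvZ l t = (c : Int))).card : Int))

theorem pvCz_nil : pvCz [] = 0 := rfl

theorem pvCz_nonneg (p : List Char) : 0 ≤ pvCz p := by
  simp [pvCz]

theorem pvCz_cons (d : Char) (w : List Char) :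
    pvCz (d :: w) = (if d = '0' then 1 else 0) + pvCz w := by
  by_cases h : d = '0' <;> simp [pvCz, h] <;> omega

theorem pvCz_append (p q : List Char) : pvCz (p ++ q) = pvCz p + pvCz q := by
  simp [pvCz, List.count_append]

theorem pvCz_le_length (p : List Char) : pvCz p ≤ (p.length : Int) := by
  simp only [pvCz]; exact_mod_cast List.count_le_length

theorem pvCz_suffix_le {v w : List Char} (h : v <:+ w) : pvCz v ≤ pvCz w := by
  simp only [pvCz]; exact_mod_cast h.sublist.count_le '0'

theorem pvZ_succ (l : List Char) (n : Nat) (h : n < l.length) :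
    pvZ l (n + 1) = pvZ l n + (if l[n] = '0' then 1 else 0) := by
  simp only [pvZ]
  rw [List.take_succ, List.getElem?_eq_getElem h]
  rw [Option.toList_some, pvCz_append, pvCz_cons, pvCz_nil]
  ring

theorem pvZ_mono (l : List Char) {t j : Nat} (h : t ≤ j) : pvZ l t ≤ pvZ l j := by
  simp only [pvZ]
  have e : l.take t = (l.take j).take t := by rw [List.take_take, min_eq_left h]
  rw [e]; simp only [pvCz]
  exact_mod_cast ((l.take j).take_sublist t).count_le '0'

theorem pvZ_le_cz (l : List Char) (t : Nat) : pvZ l t ≤ pvCz l := by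
  simp only [pvZ, pvCz]; exact_mod_cast (l.take_sublist t).count_le '0'

theorem pvZ_nonneg (l : List Char) (t : Nat) : 0 ≤ pvZ l t := pvCz_nonneg _

theorem pvCz_drop_take (l : List Char) {t j : Nat} (h : t ≤ j) :
    pvCz ((l.take j).drop t) = pvZ l j - pvZ l t := by
  have h2 := pvCz_append ((l.take j).take t) ((l.take j).drop t)
  rw [List.take_append_drop, List.take_take, min_eq_left h] at h2
  simp only [pvZ]; omega

theorem pvSw_neg {m : Int} (h : m < 0) (w : List Char) : pvSw m w = [] := by
  induction w with
  | nil => rfl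
  | cons d w ih =>
    have hc := pvCz_nonneg (d :: w)
    rw [pvSw, if_neg (by omega)]; exact ih

theorem pvSw_suffix (m : Int) (w : List Char) : pvSw m w <:+ w := by
  induction w with
  | nil => exact List.suffix_refl []
  | cons d w ih =>
    rw [pvSw]; split
    · exact List.suffix_refl _
    · exact ih.trans (List.suffix_cons d w)

theorem pvSw_cz_le {m : Int} (hm : 0 ≤ m) (w : List Char) : pvCz (pvSw m w) ≤ m := by
  induction w with
  | nil => simpa [pvSw, pvCz] using hm
  | cons d w ih =>
    rw [pvSw]; split
    · assumption
    · exact ih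

theorem pvSw_max {m : Int} {v w : List Char} (hv : v <:+ w) (hcz : pvCz v ≤ m) :
    v <:+ pvSw m w := by
  induction w with
  | nil => simpa [pvSw] using hv
  | cons d w ih =>
    rw [pvSw]; split
    · exact hv
    · rcases List.suffix_cons_iff.mp hv with rfl | hv'
      · exact absurd hcz (by assumption)
      · exact ih hv'

theorem pvSw_congr {m : Int} {u w : List Char} (hm : 0 ≤ m) (h1 : u <:+ w)
    (h2 : pvSw m w <:+ u) : pvSw m u = pvSw m w := by
  have a1 : pvSw m u <:+ pvSw m w := pvSw_max ((pvSw_suffix m u).trans h1) (pvSw_cz_le hm u)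
  have a2 : pvSw m w <:+ pvSw m u := pvSw_max h2 (pvSw_cz_le hm w)
  exact a1.sublist.antisymm a2.sublist

theorem pvSw_snoc {m : Int} (hm : 0 ≤ m) (p : List Char) (c : Char) :
    pvSw m (pvSw m p ++ [c]) = pvSw m (p ++ [c]) := by
  apply pvSw_congr hm
  · obtain ⟨q, hq⟩ := pvSw_suffix m p
    exact ⟨q, by rw [← List.append_assoc, hq]⟩
  · rcases (pvSw m (p ++ [c])).eq_nil_or_concat with hnil | ⟨v', c', hvc⟩
    · rw [hnil]; exact List.nil_suffix
    · rw [List.concat_eq_append] at hvc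
      have hs := pvSw_suffix m (p ++ [c])
      rw [hvc] at hs
      obtain ⟨q, hq⟩ := hs
      rw [← List.append_assoc] at hq
      obtain ⟨hqv, hc⟩ := List.append_inj' hq rfl
      have hcc : c' = c := by simpa using hc
      have hv'p : v' <:+ p := ⟨q, hqv⟩
      have hczv : pvCz v' ≤ m := by
        have h2 : pvCz (v' ++ [c']) = pvCz v' + pvCz [c'] := pvCz_append _ _
        have h3 : pvCz (v' ++ [c']) ≤ m := by rw [← hvc]; exact pvSw_cz_le hm _
        have := pvCz_nonneg [c']
        omega
      obtain ⟨r, hr⟩ := pvSw_max hv'p hczv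
      rw [hvc, hcc]
      exact ⟨r, by rw [← List.append_assoc, hr]⟩

theorem pvSw_len (m : Int) (p : List Char) :
    ((pvSw m p).length : Int)
      = (((Finset.range p.length).filter (fun t => pvCz (p.drop t) ≤ m)).card : Int) := by
  by_cases hm : 0 ≤ m
  · have hsuf := pvSw_suffix m p
    have hlen : (pvSw m p).length ≤ p.length := hsuf.length_le
    obtain ⟨q, hq⟩ := hsuf
    have hdrop : p.drop (p.length - (pvSw m p).length) = pvSw m p := by
      have hql : q.length + (pvSw m p).length = p.length := by
        have hlq := congrArg List.length hq
        rw [List.length_append] at hlq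
        omega
      have h1 : p.length - (pvSw m p).length = q.length := by omega
      have h2 : ∀ u : List Char, q ++ u = p → p.drop q.length = u := by
        intro u hqu
        rw [← hqu, List.drop_left]
      rw [h1]
      exact h2 _ hq
    have key : ∀ t, t < p.length →
        (pvCz (p.drop t) ≤ m ↔ p.length - (pvSw m p).length ≤ t) := by
      intro t ht
      constructor
      · intro hgood
        have h1 : p.drop t <:+ pvSw m p := pvSw_max (List.drop_suffix t p) hgood
        have h2 := h1.length_le
        rw [List.length_drop] at h2
        omega
      · intro hLt
        have he : p.drop t
            = (p.drop (p.length - (pvSw m p).length)).drop (t - (p.length - (pvSw m p).length)) := by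
          rw [List.drop_drop]
          congr 1
          omega
        have hsub : p.drop t <:+ pvSw m p := by
          rw [he, hdrop]; exact List.drop_suffix _ _
        exact le_trans (pvCz_suffix_le hsub) (pvSw_cz_le hm p)
    have hflt : (Finset.range p.length).filter (fun t => pvCz (p.drop t) ≤ m)
        = Finset.Ico (p.length - (pvSw m p).length) p.length := by
      ext t
      simp only [Finset.mem_filter, Finset.mem_range, Finset.mem_Ico]
      constructor
      · rintro ⟨h1, h2⟩; exact ⟨(key t h1).mp h2, h1⟩
      · rintro ⟨h1, h2⟩; exact ⟨h2, (key t h2).mpr h1⟩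
    rw [hflt, Nat.card_Ico]
    omega
  · push_neg at hm
    rw [pvSw_neg hm]
    have : (Finset.range p.length).filter (fun t => pvCz (p.drop t) ≤ m) = ∅ := by
      apply Finset.filter_eq_empty_iff.mpr
      intro t _
      have := pvCz_nonneg (p.drop t)
      omega
    rw [this]
    simp

theorem pvSw_len_G {l : List Char} {j : Nat} (m : Int) (hj : j ≤ l.length) :
    ((pvSw m (l.take j)).length : Int) = pvG l m j := by
  rw [pvSw_len]
  simp only [pvG]
  have hl : (l.take j).length = j := by rw [List.length_take, min_eq_left hj]
  rw [hl]
  congr 1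
  apply congrArg
  apply Finset.filter_congr
  intro t ht
  rw [Finset.mem_range] at ht
  rw [pvCz_drop_take l (le_of_lt ht)]

theorem pvShrink_eq (m : Int) (w : List Char) (z : Int) (hz : z = pvCz w) :
    pvShrink m w z = (pvSw m w, pvCz (pvSw m w)) := by
  induction w generalizing z with
  | nil =>
    simp only [pvShrink, pvSw]
    rw [hz, pvCz_nil]
  | cons d w ih =>
    rw [pvShrink, pvSw]
    by_cases hc : pvCz (d :: w) ≤ m
    · rw [if_neg (by omega), if_pos hc, hz]
    · rw [if_pos (by omega), if_neg hc]
      apply ih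
      have := pvCz_cons d w
      omega

theorem pvB_fold {m : Int} (hm : 0 ≤ m) (l : List Char) :
    l.foldl (pvBStep m) (([], 0, 0) : List Char × Int × Int)
      = (pvSw m l, pvCz (pvSw m l),
         ∑ j ∈ Finset.range l.length, ((pvSw m (l.take (j + 1))).length : Int)) := by
  induction l using List.reverseRecOn with
  | nil => simp [pvSw, pvCz]
  | append_singleton p c ih =>
    rw [List.foldl_append, ih, List.foldl_cons, List.foldl_nil]
    simp only [pvBStep]
    have hz : pvCz (pvSw m p) + (if c = '0' then 1 else 0) = pvCz (pvSw m p ++ [c]) := by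
      rw [pvCz_append, pvCz_cons, pvCz_nil]; ring
    rw [hz, pvShrink_eq m _ _ rfl, pvSw_snoc hm]
    refine Prod.ext rfl (Prod.ext rfl ?_)
    simp only [List.length_append, List.length_singleton]
    rw [Finset.sum_range_succ]
    congr 1
    · apply Finset.sum_congr rfl
      intro j hj
      rw [Finset.mem_range] at hj
      rw [List.take_append_of_le_length (by omega)]
    · rw [List.take_of_length_le (by simp)]

theorem pvAtMost_eq (l : List Char) (m : Int) :
    pvAtMost l m = ∑ j ∈ Finset.range l.length, ((pvSw m (l.take (j + 1))).length : Int) := by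
  by_cases hm : m < 0
  · rw [pvAtMost, if_pos hm]
    symm
    apply Finset.sum_eq_zero
    intro j _
    rw [pvSw_neg hm]
    simp
  · rw [pvAtMost, if_neg hm, pvB_fold (by omega)]

theorem pvG_sub (l : List Char) (k : Int) (j : Nat) :
    pvG l k j - pvG l (k - 1) j = pvE l k j := by
  have hsplit : (Finset.range j).filter (fun t => pvZ l j - pvZ l t ≤ k)
      = ((Finset.range j).filter (fun t => pvZ l j - pvZ l t ≤ k - 1))
        ∪ ((Finset.range j).filter (fun t => pvZ l j - pvZ l t = k)) := by
    rw [← Finset.filter_or]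
    apply Finset.filter_congr
    intro t _
    constructor
    · intro h; omega
    · intro h; omega
  have hdisj : Disjoint ((Finset.range j).filter (fun t => pvZ l j - pvZ l t ≤ k - 1))
      ((Finset.range j).filter (fun t => pvZ l j - pvZ l t = k)) := by
    rw [Finset.disjoint_left]
    intro t h1 h2
    rw [Finset.mem_filter] at h1 h2
    omega
  simp only [pvG, pvE]
  rw [hsplit, Finset.card_union_of_disjoint hdisj]
  push_cast
  ring

theorem pvTab_length (l : List Char) (nn : Nat) : (pvTab l nn).length = l.length + 1 := by
  simp [pvTab]

theorem pvTab_get (l : List Char) (nn i : Nat) (h : i < l.length + 1) :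
    (pvTab l nn)[i]'(by rw [pvTab_length]; exact h)
      = (((Finset.range (nn + 1)).filter (fun t => pvZ l t = (i : Int))).card : Int) := by
  unfold pvTab
  rw [List.getElem_map, List.getElem_range]

theorem pvTab_init (l : List Char) :
    PySem.List.pySetD
        ((PySem.List.pyRange 0 ((l.length : Int) + 1) 1).map (fun _ => (0 : Int))) 0 1
      = pvTab l 0 := by
  rw [PySem.List.pySetD_of_nonneg _ _ (by norm_num)]
  apply List.ext_getElem
  · simp [pvTab, PySem.List.length_pyRange_one]
  · intro i hi1 hi2
    have hi : i < l.length + 1 := by rw [pvTab_length] at hi2; exact hi2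
    rw [List.getElem_set, pvTab_get l 0 i hi, Finset.range_one, Finset.filter_singleton]
    have hz0 : pvZ l 0 = 0 := rfl
    by_cases h0 : i = 0
    · subst h0
      simp [hz0]
    · rw [if_neg (by omega), List.getElem_map]
      have hne : ¬ (pvZ l 0 = (i : Int)) := by rw [hz0]; omega
      rw [if_neg hne]
      simp

theorem pvAStep_inv {l : List Char} {k : Int} (hb : ∀ c ∈ l, c = '0' ∨ c = '1')
    (hK : pvCz l - k ≤ (l.length : Int)) {n : Nat} (hn : n < l.length) :
    pvAStep k (pvAsum l k n, pvZ l n, pvTab l n) l[n]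
      = (pvAsum l k (n + 1), pvZ l (n + 1), pvTab l (n + 1)) := by
  have hch := hb l[n] (List.getElem_mem hn)
  have hz : pvZ l n + (49 - ((l[n]).toNat : Int)) = pvZ l (n + 1) := by
    rw [pvZ_succ l n hn]
    rcases hch with h0 | h1
    · have e : ((l[n]).toNat : Int) = 48 := by rw [h0]; decide
      rw [e, if_pos h0]; ring
    · have e : ((l[n]).toNat : Int) = 49 := by rw [h1]; decide
      have hne : ¬ (l[n] = '0') := by rw [h1]; decide
      rw [e, if_neg hne]; ring
  have hNN : pvZ l (n + 1) ≤ (l.length : Int) :=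
    le_trans (pvZ_le_cz l (n + 1)) (pvCz_le_length l)
  have hz1nn : 0 ≤ pvZ l (n + 1) := pvZ_nonneg l (n + 1)
  have hread : ∀ x : Int, 0 ≤ x → x ≤ (l.length : Int) →
      PySem.List.pyGetD (pvTab l n) x 0
        = (((Finset.range (n + 1)).filter (fun t => pvZ l t = x)).card : Int) := by
    intro x hx0 hxN
    have hxe : x = ((x.toNat : Nat) : Int) := (Int.toNat_of_nonneg hx0).symm
    rw [hxe, PySem.List.pyGetD_natCast]
    have hlt : x.toNat < l.length + 1 := by omega
    have hlt2 : x.toNat < (pvTab l n).length := by rw [pvTab_length]; exact hlt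
    rw [List.getD_eq_getElem _ _ hlt2, pvTab_get l n x.toNat hlt, ← hxe]
  simp only [pvAStep]
  rw [hz]
  refine Prod.ext ?_ (Prod.ext rfl ?_)
  · -- result component
    show (if k ≤ pvZ l (n + 1) then
        pvAsum l k n + PySem.List.pyGetD (pvTab l n) (pvZ l (n + 1) - k) 0
      else pvAsum l k n) = pvAsum l k (n + 1)
    have hsucc : pvAsum l k (n + 1) = pvAsum l k n + pvE l k (n + 1) := by
      simp [pvAsum, Finset.sum_range_succ]
    rw [hsucc]
    by_cases hcond : k ≤ pvZ l (n + 1)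
    · rw [if_pos hcond]
      congr 1
      rw [hread _ (by omega) (by have := pvZ_le_cz l (n + 1); omega)]
      rw [pvE]
      congr 2
      apply Finset.filter_congr
      intro t _
      constructor
      · intro h; omega
      · intro h; omega
    · rw [if_neg hcond]
      have hE : pvE l k (n + 1) = 0 := by
        rw [pvE]
        have : (Finset.range (n + 1)).filter (fun t => pvZ l (n + 1) - pvZ l t = k) = ∅ := by
          apply Finset.filter_eq_empty_iff.mpr
          intro t ht
          rw [Finset.mem_range] at ht
          have h1 := pvZ_mono l (Nat.le_of_lt_succ ht |>.trans (Nat.le_succ n))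
          have h2 := pvZ_nonneg l t
          omega
        rw [this]
        simp
      omega
  · -- freq component
    show PySem.List.pySetD (pvTab l n) (pvZ l (n + 1))
        (PySem.List.pyGetD (pvTab l n) (pvZ l (n + 1)) 0 + 1) = pvTab l (n + 1)
    rw [hread _ hz1nn hNN, PySem.List.pySetD_of_nonneg _ _ hz1nn]
    apply List.ext_getElem
    · simp [pvTab]
    · intro i hi1 hi2
      have hi : i < l.length + 1 := by rw [pvTab_length] at hi2; exact hi2
      rw [List.getElem_set, pvTab_get l (n + 1) i hi]
      conv_rhs => rw [Finset.range_add_one, Finset.filter_insert]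
      by_cases hie : (pvZ l (n + 1)).toNat = i
      · have hieq : pvZ l (n + 1) = (i : Int) := by omega
        rw [if_pos hie, hieq, if_pos rfl,
          Finset.card_insert_of_notMem (by simp)]
        push_cast
        ring
      · have hine : ¬ (pvZ l (n + 1) = (i : Int)) := by omega
        rw [if_neg hie, if_neg hine, pvTab_get l n i hi]

theorem pvA_fold {l : List Char} {k : Int} (hb : ∀ c ∈ l, c = '0' ∨ c = '1')
    (hK : pvCz l - k ≤ (l.length : Int)) :
    ∀ (d n : Nat), n + d = l.length →
      (l.drop n).foldl (pvAStep k) (pvAsum l k n, pvZ l n, pvTab l n)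
        = (pvAsum l k l.length, pvZ l l.length, pvTab l l.length) := by
  intro d
  induction d with
  | zero =>
    intro n hn
    have he : n = l.length := by omega
    subst he
    rw [List.drop_length, List.foldl_nil]
  | succ d ih =>
    intro n hn
    have hlt : n < l.length := by omega
    rw [List.drop_eq_getElem_cons hlt, List.foldl_cons, pvAStep_inv hb hK hlt]
    exact ih (n + 1) (by omega)

-- ===== VERDICT (by name: the statement is the Claim_ definition above) =====
theorem countOfSubstringWithKZeros_spec : Claim_equal_countOfSubstringWithKZeros := by
  intro s k _ hpre
  obtain ⟨hball, hcase⟩ := hpre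
  have hb : ∀ c ∈ s.toList, c = '0' ∨ c = '1' := by
    intro c hc
    have h2 := List.all_eq_true.mp hball c hc
    simpa using h2
  unfold Spec_countOfSubstringWithKZeros
  rcases hcase with hnil | hK
  · simp [countOfSubstringWithKZeros, countOfSubstringWithKZeros_alt, pvAtMost, hnil,
      PySem.List.pyRange_one_eq_nil]
  · have hKl : pvCz s.toList - k ≤ (s.toList.length : Int) := by
      simpa [pvCz] using hK
    have hA : countOfSubstringWithKZeros s k = pvAsum s.toList k s.toList.length := by
      rw [countOfSubstringWithKZeros]
      simp only [PySem.Str.len_eq]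
      rw [PySem.List.foldl_pyRange_zero_pyGetD' s.toList ' ' (pvAStep k) _, pvTab_init]
      have hfold := pvA_fold hb hKl s.toList.length 0 (by omega)
      rw [List.drop_zero] at hfold
      have h00 : ((0 : Int), (0 : Int), pvTab s.toList 0)
          = (pvAsum s.toList k 0, pvZ s.toList 0, pvTab s.toList 0) := by
        have h0a : pvAsum s.toList k 0 = 0 := by simp [pvAsum]
        rw [h0a]; rfl
      rw [h00, hfold]
    have hB : countOfSubstringWithKZeros_alt s k = pvAsum s.toList k s.toList.length := by
      rw [countOfSubstringWithKZeros_alt, pvAtMost_eq, pvAtMost_eq, ← Finset.sum_sub_distrib,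
        pvAsum]
      apply Finset.sum_congr rfl
      intro j hj
      rw [Finset.mem_range] at hj
      rw [pvSw_len_G k (by omega), pvSw_len_G (k - 1) (by omega), pvG_sub]
    rw [hA, hB]
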